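-- pv_equiv track=rewrite | github.com/deSaintAngel/loto_stats | loto_function.py | generer_trinomes
-- ===== SOURCE A (Python) =====
-- def generer_trinomes(sequence):
--     trinomes = []
--
--     for i in range(len(sequence)):
--         for j in range(i + 1, len(sequence)):
--             for k in range(j + 1, len(sequence)):
--                 trinome = [sequence[i], sequence[j], sequence[k]]
--                 trinomes.append(trinome)
--
--     return trinomes
-- ===== SOURCE B (Python) =====
-- def generer_trinomes(sequence):
--     # Recursive include/exclude builder over a start index, appending finished
--     # triples to a shared output list (index-lexicographic order, same as A).
--     out = []
--
--     def build(start, k, prefix):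
--         if k == 0:
--             out.append(prefix)
--             return
--         if len(sequence) - start < k:
--             return
--         build(start + 1, k - 1, prefix + [sequence[start]])
--         build(start + 1, k, prefix)
--
--     build(0, 3, [])
--     return out
-- ===== Notes on version B (the rewrite author's own statement) =====
-- stated objective: alternative
-- what changed: Replaced the fixed triple-nested index loops by a recursive include/exclude combination builder (start index, remaining-pick count, accumulated prefix) that appends each finished triple to a shared output list in the same index-lexicographic order.
import Mathlib
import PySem

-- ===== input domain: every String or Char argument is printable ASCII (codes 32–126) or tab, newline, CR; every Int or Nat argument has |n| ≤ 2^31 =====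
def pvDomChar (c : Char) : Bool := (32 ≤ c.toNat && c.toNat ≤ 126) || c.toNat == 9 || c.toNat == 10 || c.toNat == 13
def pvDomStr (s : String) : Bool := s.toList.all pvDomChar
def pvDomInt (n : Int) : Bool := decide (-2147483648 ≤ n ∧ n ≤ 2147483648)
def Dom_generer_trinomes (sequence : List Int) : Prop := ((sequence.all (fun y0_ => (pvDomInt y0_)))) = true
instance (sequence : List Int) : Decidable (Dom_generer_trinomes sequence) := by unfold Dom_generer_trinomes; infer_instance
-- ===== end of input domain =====

-- B replaces A's triple-nested index loops by a recursive include/exclude combination builder; same cost, different decomposition.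

-- ===== PORT A =====
def generer_trinomes (sequence : List Int) : List (List Int) :=
  let trinomes : List (List Int) := []
  (PySem.List.pyRange 0 (sequence.length : Int)).foldl (fun trinomes i =>
    (PySem.List.pyRange (i + 1) (sequence.length : Int)).foldl (fun trinomes j =>
      (PySem.List.pyRange (j + 1) (sequence.length : Int)).foldl (fun trinomes k =>
        trinomes ++ [[PySem.List.pyGetD sequence i 0, PySem.List.pyGetD sequence j 0,
                      PySem.List.pyGetD sequence k 0]]) trinomes) trinomes) trinomes

-- ===== PORT B =====
-- port of Source B's recursive helper 'build'; the mutated shared list 'out' is threaded as an accumulator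
def buildB (sequence : List Int) (start : Int) (k : Nat) (pre : List Int)
    (out : List (List Int)) : List (List Int) :=
  if k = 0 then out ++ [pre]
  else if (sequence.length : Int) - start < (k : Int) then out
  else
    buildB sequence (start + 1) k pre
      (buildB sequence (start + 1) (k - 1) (pre ++ [PySem.List.pyGetD sequence start 0]) out)
termination_by ((sequence.length : Int) - start).toNat
decreasing_by all_goals omega

def generer_trinomes_alt (sequence : List Int) : List (List Int) :=
  buildB sequence 0 3 [] []

-- ===== PRECONDITION & SPEC =====
def Spec_generer_trinomes (sequence : List Int) (out : List (List Int)) : Prop := out = generer_trinomes_alt sequence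
instance (sequence : List Int) (out : List (List Int)) : Decidable (Spec_generer_trinomes sequence out) := by unfold Spec_generer_trinomes; infer_instance

-- ===== CLAIM (what is proved, stated in full; the proofs are below) =====
def Claim_equal_generer_trinomes : Prop := ∀ (sequence : List Int), Dom_generer_trinomes sequence → Spec_generer_trinomes sequence (generer_trinomes sequence)

-- ===== LEMMAS AND PROOFS =====

-- index form of A's nested loops, generalised over depth r and start index a
def idxForm (xs : List Int) : Nat → Int → List (List Int)
  | 0, _ => [[]]
  | r + 1, a =>
    (PySem.List.pyRange a (xs.length : Int)).flatMap (fun i =>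
      (idxForm xs r (i + 1)).map (fun t => PySem.List.pyGetD xs i 0 :: t))

theorem idxForm_of_short (xs : List Int) :
    ∀ {r : Nat} {a : Int}, (xs.length : Int) - a < (r : Int) → r ≠ 0 → idxForm xs r a = [] := by
  intro r
  induction r with
  | zero => intro a _ h; exact absurd rfl h
  | succ r ih =>
    intro a hlt _
    simp only [idxForm]
    apply List.flatMap_eq_nil_iff.mpr
    intro i hi
    have hmem := PySem.List.mem_pyRange_one.mp hi
    cases r with
    | zero =>
      -- then a ≥ length, so the range is empty and i cannot exist
      omega
    | succ r' =>
      rw [ih (by omega) (by omega)]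
      rfl

theorem idxForm_succ_split (xs : List Int) (r : Nat) {a : Int} (ha : a < (xs.length : Int)) :
    idxForm xs (r + 1) a =
      (idxForm xs r (a + 1)).map (fun t => PySem.List.pyGetD xs a 0 :: t) ++ idxForm xs (r + 1) (a + 1) := by
  conv_lhs => rw [idxForm, PySem.List.pyRange_one_cons ha, List.flatMap_cons]
  rfl

theorem buildB_spec_aux (xs : List Int) :
    ∀ (m : Nat) (start : Int) (k : Nat) (pre : List Int) (out : List (List Int)),
      ((xs.length : Int) - start).toNat ≤ m →
      buildB xs start k pre out = out ++ (idxForm xs k start).map (fun t => pre ++ t) := by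
  intro m
  induction m with
  | zero =>
    intro start k pre out hm
    rw [buildB.eq_def]
    split_ifs with hk hshort
    · subst hk; simp [idxForm]
    · rw [idxForm_of_short xs hshort hk]; simp
    · exfalso; push_cast at hshort; omega
  | succ m ih =>
    intro start k pre out hm
    rw [buildB.eq_def]
    split_ifs with hk hshort
    · subst hk; simp [idxForm]
    · rw [idxForm_of_short xs hshort hk]; simp
    · have hm' : ((xs.length : Int) - (start + 1)).toNat ≤ m := by
        push_cast at hshort; omega
      have ha : start < (xs.length : Int) := by
        push_cast at hshort; omega
      obtain ⟨k', rfl⟩ : ∃ k', k = k' + 1 := ⟨k - 1, by omega⟩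
      rw [ih (start + 1) (k' + 1 - 1) (pre ++ [PySem.List.pyGetD xs start 0]) out hm',
          ih (start + 1) (k' + 1) pre _ hm',
          idxForm_succ_split xs k' ha]
      simp [List.map_map, Function.comp_def]

theorem buildB_spec (xs : List Int) (start : Int) (k : Nat) (pre : List Int) (out : List (List Int)) :
    buildB xs start k pre out = out ++ (idxForm xs k start).map (fun t => pre ++ t) :=
  buildB_spec_aux xs ((xs.length : Int) - start).toNat start k pre out le_rfl

theorem A_eq_idxForm (xs : List Int) : generer_trinomes xs = idxForm xs 3 0 := by
  unfold generer_trinomes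
  simp only [PySem.List.foldl_append_singleton_eq_map, PySem.List.foldl_append_eq_flatMap]
  simp only [idxForm, List.map_flatMap, List.map_map, Function.comp_def]
  simp only [List.map_eq_flatMap]
  simp

-- ===== VERDICT (by name: the statement is the Claim_ definition above) =====
theorem generer_trinomes_spec : Claim_equal_generer_trinomes := by
  intro sequence _
  unfold Spec_generer_trinomes generer_trinomes_alt
  rw [A_eq_idxForm, buildB_spec]
  simp
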